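-- pv_equiv track=rewrite | github.com/shalushalem/bgfinalend | brain/outfit_pipeline.py | _merge_wardrobe
-- ===== SOURCE A (Python) =====
-- from typing import Any, Dict, List, Tuple
--
-- def _contains_word(text: str, words: List[str]) -> bool:
--     text = f" {str(text or '').lower()} "
--     return any(f" {w} " in text for w in words)
--
-- def _merge_wardrobe(
--     base: Dict[str, List[Dict[str, Any]]],
--     semantic_items: List[Dict[str, Any]],
-- ) -> Dict[str, List[Dict[str, Any]]]:
--     merged = {
--         "tops": list(base.get("tops", [])),
--         "bottoms": list(base.get("bottoms", [])),
--         "shoes": list(base.get("shoes", [])),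
--         "outerwear": list(base.get("outerwear", [])),
--     }
--
--     seen = set()
--     for key in merged:
--         for item in merged[key]:
--             seen.add(str(item.get("id", "")))
--
--     for item in semantic_items:
--         item_type = str(item.get("type", "")).lower()
--         item_id = str(item.get("id", ""))
--         if not item_id or item_id in seen:
--             continue
--
--         # PRIORITY ORDER FIX
--         if _contains_word(item_type, ["shoe", "footwear", "sneaker", "boot", "heel", "sandal"]):
--             merged["shoes"].append(item)
--
--         elif _contains_word(item_type, ["bottom", "pant", "trouser", "jean", "skirt", "short"]):
--             merged["bottoms"].append(item)
--
--         elif _contains_word(item_type, ["outer", "jacket", "coat", "blazer", "hoodie"]):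
--             merged["outerwear"].append(item)
--
--         elif _contains_word(item_type, ["top", "shirt", "tee", "blouse", "sweater"]):
--             merged["tops"].append(item)
--
--         seen.add(item_id)
--
--     return merged
-- ===== SOURCE B (Python) =====
-- from typing import Any, Dict, List, Tuple
--
-- def _contains_word(text: str, words: List[str]) -> bool:
--     text = f" {str(text or '').lower()} "
--     return any(f" {w} " in text for w in words)
--
-- _RULES: List[Tuple[str, List[str]]] = [
--     ("shoes", ["shoe", "footwear", "sneaker", "boot", "heel", "sandal"]),
--     ("bottoms", ["bottom", "pant", "trouser", "jean", "skirt", "short"]),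
--     ("outerwear", ["outer", "jacket", "coat", "blazer", "hoodie"]),
--     ("tops", ["top", "shirt", "tee", "blouse", "sweater"]),
-- ]
--
-- def _classify(item_type: str):
--     for cat, words in _RULES:
--         if _contains_word(item_type, words):
--             return cat
--     return None
--
-- def _merge_wardrobe(
--     base: Dict[str, List[Dict[str, Any]]],
--     semantic_items: List[Dict[str, Any]],
-- ) -> Dict[str, List[Dict[str, Any]]]:
--     # Staged passes: (1) keep the base lists, (2) one dedup pass that extracts the
--     # genuinely-new semantic items in order, (3) one filter pass per category.
--     cats = ["tops", "bottoms", "shoes", "outerwear"]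
--     kept = {c: list(base.get(c, [])) for c in cats}
--     seen = {str(it.get("id", "")) for lst in kept.values() for it in lst}
--
--     new_items = []
--     for item in semantic_items:
--         iid = str(item.get("id", ""))
--         if iid and iid not in seen:
--             seen.add(iid)
--             new_items.append(item)
--
--     return {
--         c: kept[c] + [it for it in new_items
--                       if _classify(str(it.get("type", "")).lower()) == c]
--         for c in cats
--     }
-- ===== Notes on version B (the rewrite author's own statement) =====
-- stated objective: alternative
-- what changed: Replaces A's single item-major dispatch loop (classify each item and append it into the right bucket as you go) by staged category-major passes: one dedup pass extracts the genuinely-new semantic items in order, then each of the four categories is built by filtering that list with a first-match rule-table classifier and concatenating onto the base list.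
import Mathlib
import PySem

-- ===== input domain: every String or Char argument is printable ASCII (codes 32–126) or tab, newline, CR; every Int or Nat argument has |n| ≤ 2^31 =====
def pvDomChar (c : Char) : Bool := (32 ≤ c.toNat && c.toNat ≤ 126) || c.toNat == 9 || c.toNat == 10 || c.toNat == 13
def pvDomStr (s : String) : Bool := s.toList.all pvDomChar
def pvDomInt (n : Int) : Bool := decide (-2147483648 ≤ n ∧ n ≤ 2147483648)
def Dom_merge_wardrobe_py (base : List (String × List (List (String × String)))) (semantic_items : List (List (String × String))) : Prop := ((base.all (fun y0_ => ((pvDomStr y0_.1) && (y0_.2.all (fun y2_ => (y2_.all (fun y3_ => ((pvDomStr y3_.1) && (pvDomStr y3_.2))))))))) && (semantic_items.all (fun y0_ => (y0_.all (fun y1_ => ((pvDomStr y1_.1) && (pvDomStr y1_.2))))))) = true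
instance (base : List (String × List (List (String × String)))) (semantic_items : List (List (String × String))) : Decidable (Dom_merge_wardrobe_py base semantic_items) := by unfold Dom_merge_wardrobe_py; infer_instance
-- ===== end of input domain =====

-- B replaces A's single item-major dispatch loop by staged category-major passes (first a dedup pass
-- extracting the new items, then one first-match filter pass per category); return-value equivalence only.

-- module helper _contains_word, shared by both Pythons
def pvContainsWord (text : String) (words : List String) : Bool :=
  let t : String := " " ++ PySem.Str.lower text ++ " "
  words.any (fun w => PySem.Str.isIn (" " ++ w ++ " ") t)

-- ===== PORT A =====
def merge_wardrobe_py (base : List (String × List (List (String × String)))) (semantic_items : List (List (String × String))) : List (String × List (List (String × String))) :=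
  let baseD := PySem.Dict.mk base
  let merged : PySem.Dict String (List (List (String × String))) :=
    ((((PySem.Dict.empty).insert "tops" (baseD.getD "tops" [])).insert "bottoms"
        (baseD.getD "bottoms" [])).insert "shoes" (baseD.getD "shoes" [])).insert "outerwear"
        (baseD.getD "outerwear" [])
  let seen : PySem.Set String :=
    merged.keys.foldl
      (fun s key =>
        (merged.getD key []).foldl (fun s item => s.add ((PySem.Dict.mk item).getD "id" "")) s)
      PySem.Set.empty
  let res := semantic_items.foldl
    (fun (st : PySem.Dict String (List (List (String × String))) × PySem.Set String) item =>
      let item_type := PySem.Str.lower ((PySem.Dict.mk item).getD "type" "")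
      let item_id := (PySem.Dict.mk item).getD "id" ""
      if item_id == "" || st.2.contains item_id then st
      else
        let merged' :=
          if pvContainsWord item_type ["shoe", "footwear", "sneaker", "boot", "heel", "sandal"] then
            st.1.modify "shoes" [] (· ++ [item])
          else if pvContainsWord item_type ["bottom", "pant", "trouser", "jean", "skirt", "short"] then
            st.1.modify "bottoms" [] (· ++ [item])
          else if pvContainsWord item_type ["outer", "jacket", "coat", "blazer", "hoodie"] then
            st.1.modify "outerwear" [] (· ++ [item])
          else if pvContainsWord item_type ["top", "shirt", "tee", "blouse", "sweater"] then
            st.1.modify "tops" [] (· ++ [item])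
          else st.1
        (merged', st.2.add item_id))
    (merged, seen)
  res.1.items

-- ===== PORT B =====
-- the ordered rule table _RULES of Source B
def pvRules : List (String × List String) :=
  [("shoes", ["shoe", "footwear", "sneaker", "boot", "heel", "sandal"]),
   ("bottoms", ["bottom", "pant", "trouser", "jean", "skirt", "short"]),
   ("outerwear", ["outer", "jacket", "coat", "blazer", "hoodie"]),
   ("tops", ["top", "shirt", "tee", "blouse", "sweater"])]

-- _classify: first rule whose word list matches (the for/return loop is List.find?)
def pvClassify (item_type : String) : Option String :=
  (pvRules.find? (fun r => pvContainsWord item_type r.2)).map (·.1)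

def merge_wardrobe_py_alt (base : List (String × List (List (String × String)))) (semantic_items : List (List (String × String))) : List (String × List (List (String × String))) :=
  let cats : List String := ["tops", "bottoms", "shoes", "outerwear"]
  let baseD := PySem.Dict.mk base
  let kept : PySem.Dict String (List (List (String × String))) :=
    cats.foldl (fun d c => d.insert c (baseD.getD c [])) PySem.Dict.empty
  let seen : PySem.Set String :=
    PySem.Set.ofList (kept.values.flatMap (fun lst => lst.map (fun it => (PySem.Dict.mk it).getD "id" "")))
  -- dedup pass: new_items in order, first occurrence of each fresh nonempty id
  let st := semantic_items.foldl
    (fun (st : List (List (String × String)) × PySem.Set String) item =>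
      let iid := (PySem.Dict.mk item).getD "id" ""
      if iid != "" && !(st.2.contains iid) then (st.1 ++ [item], st.2.add iid) else st)
    ([], seen)
  -- category-major assembly: one filter pass per category
  cats.map (fun c =>
    (c, kept.getD c [] ++
        st.1.filter (fun it => pvClassify (PySem.Str.lower ((PySem.Dict.mk it).getD "type" "")) == some c)))

-- ===== PRECONDITION & SPEC =====
def Spec_merge_wardrobe_py (base : List (String × List (List (String × String)))) (semantic_items : List (List (String × String))) (out : List (String × List (List (String × String)))) : Prop := out = merge_wardrobe_py_alt base semantic_items
instance (base : List (String × List (List (String × String)))) (semantic_items : List (List (String × String))) (out : List (String × List (List (String × String)))) : Decidable (Spec_merge_wardrobe_py base semantic_items out) := by unfold Spec_merge_wardrobe_py; infer_instance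

-- ===== CLAIM (what is proved, stated in full; the proofs are below) =====
def Claim_equal_merge_wardrobe_py : Prop := ∀ (base : List (String × List (List (String × String)))) (semantic_items : List (List (String × String))), Dom_merge_wardrobe_py base semantic_items → Spec_merge_wardrobe_py base semantic_items (merge_wardrobe_py base semantic_items)

-- ===== LEMMAS AND PROOFS =====

-- named copies of the two loop bodies (definitionally equal to the lambdas inside the ports)
def pvStepA (st : PySem.Dict String (List (List (String × String))) × PySem.Set String)
    (item : List (String × String)) :
    PySem.Dict String (List (List (String × String))) × PySem.Set String :=
  let item_type := PySem.Str.lower ((PySem.Dict.mk item).getD "type" "")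
  let item_id := (PySem.Dict.mk item).getD "id" ""
  if item_id == "" || st.2.contains item_id then st
  else
    let merged' :=
      if pvContainsWord item_type ["shoe", "footwear", "sneaker", "boot", "heel", "sandal"] then
        st.1.modify "shoes" [] (· ++ [item])
      else if pvContainsWord item_type ["bottom", "pant", "trouser", "jean", "skirt", "short"] then
        st.1.modify "bottoms" [] (· ++ [item])
      else if pvContainsWord item_type ["outer", "jacket", "coat", "blazer", "hoodie"] then
        st.1.modify "outerwear" [] (· ++ [item])
      else if pvContainsWord item_type ["top", "shirt", "tee", "blouse", "sweater"] then
        st.1.modify "tops" [] (· ++ [item])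
      else st.1
    (merged', st.2.add item_id)

def pvStepC (st : List (List (String × String)) × PySem.Set String)
    (item : List (String × String)) : List (List (String × String)) × PySem.Set String :=
  if ((PySem.Dict.mk item).getD "id" "" != "") && !(st.2.contains ((PySem.Dict.mk item).getD "id" "")) then
    (st.1 ++ [item], st.2.add ((PySem.Dict.mk item).getD "id" ""))
  else st

-- recursive specification of B's dedup pass
def pvCollect : PySem.Set String → List (List (String × String)) → List (List (String × String))
  | _, [] => []
  | seen, item :: rest =>
      if ((PySem.Dict.mk item).getD "id" "" != "") && !(seen.contains ((PySem.Dict.mk item).getD "id" "")) then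
        item :: pvCollect (seen.add ((PySem.Dict.mk item).getD "id" "")) rest
      else pvCollect seen rest

theorem pvCollect_foldl (sem : List (List (String × String)))
    (acc : List (List (String × String))) (seen : PySem.Set String) :
    (sem.foldl pvStepC (acc, seen)).1 = acc ++ pvCollect seen sem := by
  induction sem generalizing acc seen with
  | nil => simp [pvCollect]
  | cons item rest ih =>
      rw [List.foldl_cons]
      by_cases hg : (((PySem.Dict.mk item).getD "id" "" != "") && !(seen.contains ((PySem.Dict.mk item).getD "id" ""))) = true
      · have e : pvStepC (acc, seen) item = (acc ++ [item], seen.add ((PySem.Dict.mk item).getD "id" "")) := by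
          dsimp only [pvStepC]; rw [if_pos hg]
        rw [e, ih, pvCollect, if_pos hg, List.append_assoc]
        rfl
      · have e : pvStepC (acc, seen) item = (acc, seen) := by
          dsimp only [pvStepC]; rw [if_neg hg]
        rw [e, ih, pvCollect, if_neg hg]

-- the guard of B's dedup pass is the negation of A's skip condition
theorem pv_guard_neg (iid : String) (c : Bool) :
    ((iid != "") && !c) = !(iid == "" || c) := by
  cases h : (iid == "") <;> cases c <;> simp [bne, h]

-- how the rule-table classifier evaluates, per outcome of the four word tests
theorem pvClassify_shoes (ty : String) (h1 : pvContainsWord ty ["shoe", "footwear", "sneaker", "boot", "heel", "sandal"] = true) :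
    pvClassify ty = some "shoes" := by
  unfold pvClassify pvRules
  rw [List.find?_cons_of_pos (by simpa using h1)]
  rfl

theorem pvClassify_bottoms (ty : String) (h1 : pvContainsWord ty ["shoe", "footwear", "sneaker", "boot", "heel", "sandal"] = false)
    (h2 : pvContainsWord ty ["bottom", "pant", "trouser", "jean", "skirt", "short"] = true) : pvClassify ty = some "bottoms" := by
  unfold pvClassify pvRules
  rw [List.find?_cons_of_neg (by simpa using h1), List.find?_cons_of_pos (by simpa using h2)]
  rfl

theorem pvClassify_outerwear (ty : String) (h1 : pvContainsWord ty ["shoe", "footwear", "sneaker", "boot", "heel", "sandal"] = false)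
    (h2 : pvContainsWord ty ["bottom", "pant", "trouser", "jean", "skirt", "short"] = false) (h3 : pvContainsWord ty ["outer", "jacket", "coat", "blazer", "hoodie"] = true) :
    pvClassify ty = some "outerwear" := by
  unfold pvClassify pvRules
  rw [List.find?_cons_of_neg (by simpa using h1), List.find?_cons_of_neg (by simpa using h2),
    List.find?_cons_of_pos (by simpa using h3)]
  rfl

theorem pvClassify_tops (ty : String) (h1 : pvContainsWord ty ["shoe", "footwear", "sneaker", "boot", "heel", "sandal"] = false)
    (h2 : pvContainsWord ty ["bottom", "pant", "trouser", "jean", "skirt", "short"] = false) (h3 : pvContainsWord ty ["outer", "jacket", "coat", "blazer", "hoodie"] = false)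
    (h4 : pvContainsWord ty ["top", "shirt", "tee", "blouse", "sweater"] = true) : pvClassify ty = some "tops" := by
  unfold pvClassify pvRules
  rw [List.find?_cons_of_neg (by simpa using h1), List.find?_cons_of_neg (by simpa using h2),
    List.find?_cons_of_neg (by simpa using h3), List.find?_cons_of_pos (by simpa using h4)]
  rfl

theorem pvClassify_none (ty : String) (h1 : pvContainsWord ty ["shoe", "footwear", "sneaker", "boot", "heel", "sandal"] = false)
    (h2 : pvContainsWord ty ["bottom", "pant", "trouser", "jean", "skirt", "short"] = false) (h3 : pvContainsWord ty ["outer", "jacket", "coat", "blazer", "hoodie"] = false)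
    (h4 : pvContainsWord ty ["top", "shirt", "tee", "blouse", "sweater"] = false) : pvClassify ty = none := by
  unfold pvClassify pvRules
  rw [List.find?_cons_of_neg (by simpa using h1), List.find?_cons_of_neg (by simpa using h2),
    List.find?_cons_of_neg (by simpa using h3), List.find?_cons_of_neg (by simpa using h4)]
  rfl

-- abbreviation for B's per-category filter predicate
def pvFiltP (c : String) (it : List (String × String)) : Bool :=
  pvClassify (PySem.Str.lower ((PySem.Dict.mk it).getD "type" "")) == some c

-- the central invariant: A's fold produces, per category, the running prefix followed by
-- the category-filter of B's deduplicated item list.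
theorem pv_loop_filter (sem : List (List (String × String)))
    (t b s o : List (List (String × String))) (seen : PySem.Set String) :
    (sem.foldl pvStepA ((PySem.Dict.mk [("tops", t), ("bottoms", b), ("shoes", s), ("outerwear", o)] : PySem.Dict String (List (List (String × String)))), seen)).1.items
    = [("tops", t ++ (pvCollect seen sem).filter (pvFiltP "tops")),
       ("bottoms", b ++ (pvCollect seen sem).filter (pvFiltP "bottoms")),
       ("shoes", s ++ (pvCollect seen sem).filter (pvFiltP "shoes")),
       ("outerwear", o ++ (pvCollect seen sem).filter (pvFiltP "outerwear"))] := by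
  induction sem generalizing t b s o seen with
  | nil => simp [pvCollect]
  | cons item rest ih =>
      rw [List.foldl_cons]
      by_cases hskip : (((PySem.Dict.mk item).getD "id" "") == "" || seen.contains ((PySem.Dict.mk item).getD "id" "")) = true
      · have ea : pvStepA ((PySem.Dict.mk [("tops", t), ("bottoms", b), ("shoes", s), ("outerwear", o)] : PySem.Dict String (List (List (String × String)))), seen) item = ((PySem.Dict.mk [("tops", t), ("bottoms", b), ("shoes", s), ("outerwear", o)] : PySem.Dict String (List (List (String × String)))), seen) := by
          dsimp only [pvStepA]; rw [if_pos hskip]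
        have ec : pvCollect seen (item :: rest) = pvCollect seen rest := by
          rw [pvCollect, if_neg (by rw [pv_guard_neg, hskip]; simp)]
        rw [ea, ec]
        exact ih t b s o seen
      · have hskip' : (((PySem.Dict.mk item).getD "id" "") == "" || seen.contains ((PySem.Dict.mk item).getD "id" "")) = false := by
          simpa using hskip
        have hg : (((PySem.Dict.mk item).getD "id" "" != "") && !(seen.contains ((PySem.Dict.mk item).getD "id" ""))) = true := by
          rw [pv_guard_neg, hskip']; rfl
        have ec : pvCollect seen (item :: rest) = item :: pvCollect (seen.add ((PySem.Dict.mk item).getD "id" "")) rest := by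
          rw [pvCollect, if_pos hg]
        rw [ec]
        cases h1 : pvContainsWord (PySem.Str.lower ((PySem.Dict.mk item).getD "type" "")) ["shoe", "footwear", "sneaker", "boot", "heel", "sandal"] with
        | true =>
            have hc := pvClassify_shoes (PySem.Str.lower ((PySem.Dict.mk item).getD "type" "")) h1
            have ea : pvStepA ((PySem.Dict.mk [("tops", t), ("bottoms", b), ("shoes", s), ("outerwear", o)] : PySem.Dict String (List (List (String × String)))), seen) item = ((PySem.Dict.mk [("tops", t), ("bottoms", b), ("shoes", s ++ [item]), ("outerwear", o)] : PySem.Dict String (List (List (String × String)))), seen.add ((PySem.Dict.mk item).getD "id" "")) := by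
              dsimp only [pvStepA]; rw [if_neg hskip, if_pos h1]; rfl
            rw [ea, ih]
            simp [pvFiltP, hc, List.append_assoc]
        | false =>
          cases h2 : pvContainsWord (PySem.Str.lower ((PySem.Dict.mk item).getD "type" "")) ["bottom", "pant", "trouser", "jean", "skirt", "short"] with
          | true =>
              have hc := pvClassify_bottoms (PySem.Str.lower ((PySem.Dict.mk item).getD "type" "")) h1 h2
              have ea : pvStepA ((PySem.Dict.mk [("tops", t), ("bottoms", b), ("shoes", s), ("outerwear", o)] : PySem.Dict String (List (List (String × String)))), seen) item = ((PySem.Dict.mk [("tops", t), ("bottoms", b ++ [item]), ("shoes", s), ("outerwear", o)] : PySem.Dict String (List (List (String × String)))), seen.add ((PySem.Dict.mk item).getD "id" "")) := by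
                dsimp only [pvStepA]; rw [if_neg hskip, if_neg (by simp [h1]), if_pos h2]; rfl
              rw [ea, ih]
              simp [pvFiltP, hc, List.append_assoc]
          | false =>
            cases h3 : pvContainsWord (PySem.Str.lower ((PySem.Dict.mk item).getD "type" "")) ["outer", "jacket", "coat", "blazer", "hoodie"] with
            | true =>
                have hc := pvClassify_outerwear (PySem.Str.lower ((PySem.Dict.mk item).getD "type" "")) h1 h2 h3
                have ea : pvStepA ((PySem.Dict.mk [("tops", t), ("bottoms", b), ("shoes", s), ("outerwear", o)] : PySem.Dict String (List (List (String × String)))), seen) item = ((PySem.Dict.mk [("tops", t), ("bottoms", b), ("shoes", s), ("outerwear", o ++ [item])] : PySem.Dict String (List (List (String × String)))), seen.add ((PySem.Dict.mk item).getD "id" "")) := by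
                  dsimp only [pvStepA]; rw [if_neg hskip, if_neg (by simp [h1]), if_neg (by simp [h2]), if_pos h3]; rfl
                rw [ea, ih]
                simp [pvFiltP, hc, List.append_assoc]
            | false =>
              cases h4 : pvContainsWord (PySem.Str.lower ((PySem.Dict.mk item).getD "type" "")) ["top", "shirt", "tee", "blouse", "sweater"] with
              | true =>
                  have hc := pvClassify_tops (PySem.Str.lower ((PySem.Dict.mk item).getD "type" "")) h1 h2 h3 h4
                  have ea : pvStepA ((PySem.Dict.mk [("tops", t), ("bottoms", b), ("shoes", s), ("outerwear", o)] : PySem.Dict String (List (List (String × String)))), seen) item = ((PySem.Dict.mk [("tops", t ++ [item]), ("bottoms", b), ("shoes", s), ("outerwear", o)] : PySem.Dict String (List (List (String × String)))), seen.add ((PySem.Dict.mk item).getD "id" "")) := by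
                    dsimp only [pvStepA]; rw [if_neg hskip, if_neg (by simp [h1]), if_neg (by simp [h2]), if_neg (by simp [h3]), if_pos h4]; rfl
                  rw [ea, ih]
                  simp [pvFiltP, hc, List.append_assoc]
              | false =>
                  have hc := pvClassify_none (PySem.Str.lower ((PySem.Dict.mk item).getD "type" "")) h1 h2 h3 h4
                  have ea : pvStepA ((PySem.Dict.mk [("tops", t), ("bottoms", b), ("shoes", s), ("outerwear", o)] : PySem.Dict String (List (List (String × String)))), seen) item = ((PySem.Dict.mk [("tops", t), ("bottoms", b), ("shoes", s), ("outerwear", o)] : PySem.Dict String (List (List (String × String)))), seen.add ((PySem.Dict.mk item).getD "id" "")) := by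
                    dsimp only [pvStepA]; rw [if_neg hskip, if_neg (by simp [h1]), if_neg (by simp [h2]), if_neg (by simp [h3]), if_neg (by simp [h4])]
                  rw [ea, ih]
                  simp [pvFiltP, hc]

-- A's seen-seeding double loop over the merged dict equals B's flat set comprehension.
theorem pv_seen_eq (t b s o : List (List (String × String))) :
    ((PySem.Dict.mk [("tops", t), ("bottoms", b), ("shoes", s), ("outerwear", o)] : PySem.Dict String (List (List (String × String)))).keys.foldl
      (fun st key =>
        ((PySem.Dict.mk [("tops", t), ("bottoms", b), ("shoes", s), ("outerwear", o)] : PySem.Dict String (List (List (String × String)))).getD key []).foldl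
          (fun st item => st.add ((PySem.Dict.mk item).getD "id" "")) st)
      PySem.Set.empty)
    = PySem.Set.ofList
        ((PySem.Dict.mk [("tops", t), ("bottoms", b), ("shoes", s), ("outerwear", o)] : PySem.Dict String (List (List (String × String)))).values.flatMap
          (fun lst => lst.map (fun item => (PySem.Dict.mk item).getD "id" ""))) := by
  show (o.foldl (fun st item => st.add ((PySem.Dict.mk item).getD "id" ""))
         (s.foldl (fun st item => st.add ((PySem.Dict.mk item).getD "id" ""))
           (b.foldl (fun st item => st.add ((PySem.Dict.mk item).getD "id" ""))
             (t.foldl (fun st item => st.add ((PySem.Dict.mk item).getD "id" "")) PySem.Set.empty))))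
      = PySem.Set.ofList (t.map (fun item => (PySem.Dict.mk item).getD "id" "") ++ (b.map (fun item => (PySem.Dict.mk item).getD "id" "") ++ (s.map (fun item => (PySem.Dict.mk item).getD "id" "") ++ (o.map (fun item => (PySem.Dict.mk item).getD "id" "") ++ []))))
  rw [← PySem.Set.update_map_eq_foldl_add, ← PySem.Set.update_map_eq_foldl_add,
    ← PySem.Set.update_map_eq_foldl_add, ← PySem.Set.update_map_eq_foldl_add]
  simp [PySem.Set.update, PySem.Set.ofList_eq_foldl, List.foldl_append, PySem.Set.empty]

-- ===== VERDICT (by name: the statement is the Claim_ definition above) =====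
theorem merge_wardrobe_py_spec : Claim_equal_merge_wardrobe_py := by
  intro base sem _
  show merge_wardrobe_py base sem = merge_wardrobe_py_alt base sem
  have e1 : merge_wardrobe_py base sem
      = (sem.foldl pvStepA ((PySem.Dict.mk [("tops", ((PySem.Dict.mk base).getD "tops" ([] : List (List (String × String))))), ("bottoms", ((PySem.Dict.mk base).getD "bottoms" ([] : List (List (String × String))))), ("shoes", ((PySem.Dict.mk base).getD "shoes" ([] : List (List (String × String))))), ("outerwear", ((PySem.Dict.mk base).getD "outerwear" ([] : List (List (String × String)))))] : PySem.Dict String (List (List (String × String)))), ((PySem.Dict.mk [("tops", ((PySem.Dict.mk base).getD "tops" ([] : List (List (String × String))))), ("bottoms", ((PySem.Dict.mk base).getD "bottoms" ([] : List (List (String × String))))), ("shoes", ((PySem.Dict.mk base).getD "shoes" ([] : List (List (String × String))))), ("outerwear", ((PySem.Dict.mk base).getD "outerwear" ([] : List (List (String × String)))))] : PySem.Dict String (List (List (String × String)))).keys.foldl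
      (fun st key => ((PySem.Dict.mk [("tops", ((PySem.Dict.mk base).getD "tops" ([] : List (List (String × String))))), ("bottoms", ((PySem.Dict.mk base).getD "bottoms" ([] : List (List (String × String))))), ("shoes", ((PySem.Dict.mk base).getD "shoes" ([] : List (List (String × String))))), ("outerwear", ((PySem.Dict.mk base).getD "outerwear" ([] : List (List (String × String)))))] : PySem.Dict String (List (List (String × String)))).getD key []).foldl
          (fun st item => st.add ((PySem.Dict.mk item).getD "id" "")) st)
      PySem.Set.empty))).1.items := rfl
  have e2 : merge_wardrobe_py_alt base sem
      = [("tops", ((PySem.Dict.mk base).getD "tops" ([] : List (List (String × String)))) ++ ((sem.foldl pvStepC (([] : List (List (String × String))), (PySem.Set.ofList ((PySem.Dict.mk [("tops", ((PySem.Dict.mk base).getD "tops" ([] : List (List (String × String))))), ("bottoms", ((PySem.Dict.mk base).getD "bottoms" ([] : List (List (String × String))))), ("shoes", ((PySem.Dict.mk base).getD "shoes" ([] : List (List (String × String))))), ("outerwear", ((PySem.Dict.mk base).getD "outerwear" ([] : List (List (String × String)))))] : PySem.Dict String (List (List (String × String)))).values.flatMap (fun lst => lst.map (fun it => (PySem.Dict.mk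 it).getD "id" "")))))).1.filter (pvFiltP "tops"))),
         ("bottoms", ((PySem.Dict.mk base).getD "bottoms" ([] : List (List (String × String)))) ++ ((sem.foldl pvStepC (([] : List (List (String × String))), (PySem.Set.ofList ((PySem.Dict.mk [("tops", ((PySem.Dict.mk base).getD "tops" ([] : List (List (String × String))))), ("bottoms", ((PySem.Dict.mk base).getD "bottoms" ([] : List (List (String × String))))), ("shoes", ((PySem.Dict.mk base).getD "shoes" ([] : List (List (String × String))))), ("outerwear", ((PySem.Dict.mk base).getD "outerwear" ([] : List (List (String × String)))))] : PySem.Dict String (List (List (String × String)))).values.flatMap (fun lst => lst.map (fun it => (PySem.Dict.mk it).getD "id" "")))))).1.filter (pvFiltP "bottoms"))),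
         ("shoes", ((PySem.Dict.mk base).getD "shoes" ([] : List (List (String × String)))) ++ ((sem.foldl pvStepC (([] : List (List (String × String))), (PySem.Set.ofList ((PySem.Dict.mk [("tops", ((PySem.Dict.mk base).getD "tops" ([] : List (List (String × String))))), ("bottoms", ((PySem.Dict.mk base).getD "bottoms" ([] : List (List (String × String))))), ("shoes", ((PySem.Dict.mk base).getD "shoes" ([] : List (List (String × String))))), ("outerwear", ((PySem.Dict.mk base).getD "outerwear" ([] : List (List (String × String)))))] : PySem.Dict String (List (List (String × String)))).values.flatMap (fun lst => lst.map (fun it => (PySem.Dict.mk it).getD "id" "")))))).1.filter (pvFiltP "shoes"))),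
         ("outerwear", ((PySem.Dict.mk base).getD "outerwear" ([] : List (List (String × String)))) ++ ((sem.foldl pvStepC (([] : List (List (String × String))), (PySem.Set.ofList ((PySem.Dict.mk [("tops", ((PySem.Dict.mk base).getD "tops" ([] : List (List (String × String))))), ("bottoms", ((PySem.Dict.mk base).getD "bottoms" ([] : List (List (String × String))))), ("shoes", ((PySem.Dict.mk base).getD "shoes" ([] : List (List (String × String))))), ("outerwear", ((PySem.Dict.mk base).getD "outerwear" ([] : List (List (String × String)))))] : PySem.Dict String (List (List (String × String)))).values.flatMap (fun lst => lst.map (fun it => (PySem.Dict.mk it).getD "id" "")))))).1.filter (pvFiltP "outerwear")))] := rfl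
  rw [e1, e2, pv_seen_eq]
  rw [pvCollect_foldl]
  simp only [List.nil_append]
  exact pv_loop_filter sem _ _ _ _ _
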